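-- pv_equiv track=rewrite | github.com/rulitka/basic | 22.py | SherlockValidString
-- ===== SOURCE A (Python) =====
-- def create_dict(s):
--     count = {}
--     for elem in s:
--         if elem in count:
--             count[elem] += 1
--         else:
--             count[elem] = 1
--     return count
--
-- def SherlockValidString(s):
--     number = 0
--     Flag = True
--     count_dict = create_dict(s)
--     new_values = []
--     for i in count_dict.values():
--         new_values.append(i)
--     for elem in range(len(new_values) - 1):
--         if number == 0:
--             if new_values[elem] == new_values[elem + 1]:
--                 continue
--             elif new_values[elem] != new_values[elem + 1]:
--                 number += 1
--                 if number == 1: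
--                     if new_values[elem + 1] - new_values[elem] == 1:
--                         Flag = True
--                         continue
--                     elif new_values[elem] - new_values[elem + 1] == 1:
--                         Flag = True
--                         continue
--                     else:
--                         Flag = False
--                 else:
--                    Flag = False
--         else:
--             Flag = False
--     return Flag
-- ===== SOURCE B (Python) =====
-- def _valid(vals):
--     n = len(vals)
--     if n < 2:
--         return True
--     return all(v == vals[0] for v in vals[:n-1]) and abs(vals[n-1] - vals[n-2]) <= 1
--
-- def SherlockValidString(s):
--     count = {}
--     for c in s:
--         count[c] = count.get(c, 0) + 1
--     return _valid(list(count.values()))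
-- ===== Notes on version B (the rewrite author's own statement) =====
-- stated objective: simpler
-- what changed: Replaces A's index-based state-machine scan (mismatch counter 'number' plus Flag with leftover-state overwrites) by a closed condition on the frequency list: all values except the last are equal and the last two differ by at most 1.
import Mathlib
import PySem

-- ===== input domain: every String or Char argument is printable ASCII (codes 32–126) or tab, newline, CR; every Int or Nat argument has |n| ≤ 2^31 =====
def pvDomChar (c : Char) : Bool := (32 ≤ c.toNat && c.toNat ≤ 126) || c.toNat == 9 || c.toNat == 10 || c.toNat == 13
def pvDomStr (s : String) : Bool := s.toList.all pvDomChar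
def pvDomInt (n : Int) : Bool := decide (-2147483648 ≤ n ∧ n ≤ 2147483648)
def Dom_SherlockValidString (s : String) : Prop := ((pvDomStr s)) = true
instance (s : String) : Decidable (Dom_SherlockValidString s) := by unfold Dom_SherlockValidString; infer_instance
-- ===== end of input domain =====

-- B replaces A's index-based state-machine scan by a closed condition on the frequency
-- list (all but the last value equal, last two within 1); same O(n) cost, simpler.

-- ===== PORT A =====
-- create_dict: 'count[elem] += 1' is read-then-overwrite-in-place; 'count[elem] = 1' appends
def SherlockValidString (s : String) : Bool :=
  let count : PySem.Dict Char Int :=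
    s.toList.foldl
      (fun d elem => if d.contains elem then d.insert elem (d.getD elem 0 + 1)
                     else d.insert elem 1)
      PySem.Dict.empty
  let new_values : List Int := count.values.foldl (fun acc i => acc ++ [i]) []
  -- indices elem and elem+1 are always in range, so pyGetD is exact here
  let st :=
    (PySem.List.pyRange 0 (PySem.List.len new_values - 1) 1).foldl
      (fun (st : Int × Bool) elem =>
        if st.1 = 0 then
          if PySem.List.pyGetD new_values elem 0 = PySem.List.pyGetD new_values (elem + 1) 0 then
            st
          else
            if st.1 + 1 = 1 then
              if PySem.List.pyGetD new_values (elem + 1) 0 - PySem.List.pyGetD new_values elem 0 = 1 then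
                (st.1 + 1, true)
              else if PySem.List.pyGetD new_values elem 0 - PySem.List.pyGetD new_values (elem + 1) 0 = 1 then
                (st.1 + 1, true)
              else (st.1 + 1, false)
            else (st.1 + 1, false)
        else (st.1, false))
      ((0 : Int), true)
  st.2

-- ===== PORT B =====
-- indices 0, n-1, n-2 are in range when n ≥ 2, so pyGetD is exact here
def sherlockValid (vals : List Int) : Bool :=
  let n : Int := PySem.List.len vals
  if n < 2 then true
  else
    (PySem.List.slice vals none (some (n - 1))).all (fun v => v == PySem.List.pyGetD vals 0 0)
      && decide (|PySem.List.pyGetD vals (n - 1) 0 - PySem.List.pyGetD vals (n - 2) 0| ≤ 1)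

def SherlockValidString_alt (s : String) : Bool :=
  let count : PySem.Dict Char Int :=
    s.toList.foldl (fun d c => d.insert c (d.getD c 0 + 1)) PySem.Dict.empty
  sherlockValid count.values

-- ===== PRECONDITION & SPEC =====
def Spec_SherlockValidString (s : String) (out : Bool) : Prop := out = SherlockValidString_alt s
instance (s : String) (out : Bool) : Decidable (Spec_SherlockValidString s out) := by unfold Spec_SherlockValidString; infer_instance

-- ===== CLAIM (what is proved, stated in full; the proofs are below) =====
def Claim_equal_SherlockValidString : Prop := ∀ (s : String), Dom_SherlockValidString s → Spec_SherlockValidString s (SherlockValidString s)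

-- ===== LEMMAS AND PROOFS =====

-- A's step function, on an adjacent pair of values
def aStep (st : Int × Bool) (p : Int × Int) : Int × Bool :=
  if st.1 = 0 then
    if p.1 = p.2 then st
    else
      if st.1 + 1 = 1 then
        if p.2 - p.1 = 1 then (st.1 + 1, true)
        else if p.1 - p.2 = 1 then (st.1 + 1, true)
        else (st.1 + 1, false)
      else (st.1 + 1, false)
  else (st.1, false)

-- the common recursive specification both sides are reduced to
def bSpec : List Int → Bool
  | [] => true
  | [_] => true
  | [a, b] => decide (|b - a| ≤ 1)
  | a :: b :: c :: t => (a == b) && bSpec (b :: c :: t)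

lemma pairs_map (vals : List Int) :
    (PySem.List.pyRange 0 (PySem.List.len vals - 1) 1).map
      (fun j => (PySem.List.pyGetD vals j 0, PySem.List.pyGetD vals (j + 1) 0))
      = vals.zip vals.tail := by
  apply List.ext_getElem
  · simp [PySem.List.length_pyRange_one, PySem.List.len]
  · intro k h1 h2
    have hk : k < vals.length - 1 := by
      simpa [PySem.List.length_pyRange_one, PySem.List.len] using h1
    have ht : k < vals.tail.length := by
      simp only [List.length_tail]; omega
    simp only [List.getElem_map, PySem.List.getElem_pyRange_one, List.getElem_zip]
    apply Prod.ext
    · show PySem.List.pyGetD vals (0 + (k : Int)) 0 = vals[k]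
      rw [PySem.List.pyGetD_eq_getElem vals 0 (by omega) (by omega)]
      congr 1; omega
    · show PySem.List.pyGetD vals (0 + (k : Int) + 1) 0 = vals.tail[k]
      rw [PySem.List.pyGetD_eq_getElem vals 0 (by omega) (by omega)]
      rw [List.getElem_tail ht]
      congr 1; omega

lemma A_fold_eq (vals : List Int) :
    (PySem.List.pyRange 0 (PySem.List.len vals - 1) 1).foldl
      (fun (st : Int × Bool) elem =>
        if st.1 = 0 then
          if PySem.List.pyGetD vals elem 0 = PySem.List.pyGetD vals (elem + 1) 0 then st
          else
            if st.1 + 1 = 1 then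
              if PySem.List.pyGetD vals (elem + 1) 0 - PySem.List.pyGetD vals elem 0 = 1 then
                (st.1 + 1, true)
              else if PySem.List.pyGetD vals elem 0 - PySem.List.pyGetD vals (elem + 1) 0 = 1 then
                (st.1 + 1, true)
              else (st.1 + 1, false)
            else (st.1 + 1, false)
        else (st.1, false))
      ((0 : Int), true)
      = (vals.zip vals.tail).foldl aStep ((0 : Int), true) := by
  rw [← pairs_map vals, List.foldl_map]
  rfl

lemma foldl_dead (ps : List (Int × Int)) (n : Int) (f : Bool) (hn : n ≠ 0) :
    ps.foldl aStep (n, f) = (n, if ps.isEmpty then f else false) := by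
  induction ps generalizing f with
  | nil => rfl
  | cons p t ih =>
      have : aStep (n, f) p = (n, false) := by simp [aStep, hn]
      simp [List.foldl_cons, this, ih false, List.isEmpty_cons]

lemma aLoop_eq_bSpec (vals : List Int) :
    ((vals.zip vals.tail).foldl aStep ((0 : Int), true)).2 = bSpec vals := by
  induction vals using bSpec.induct with
  | case1 => rfl
  | case2 a => rfl
  | case3 a b =>
      by_cases hab : a = b
      · simp [aStep, hab, bSpec]
      · simp only [List.tail_cons, List.zip_cons_cons, List.zip_nil_right,
          List.foldl_cons, List.foldl_nil, aStep, bSpec]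
        simp only [hab, if_true, if_false]
        split_ifs with h1 h2 <;> simp [abs_le] <;> omega
  | case4 a b c t ih =>
      show ((((a, b) :: ((b :: c :: t).zip (c :: t))).foldl aStep ((0:Int), true)).2 : Bool)
        = bSpec (a :: b :: c :: t)
      by_cases hab : a = b
      · have h1 : aStep ((0:Int), true) (a, b) = ((0:Int), true) := by simp [aStep, hab]
        rw [List.foldl_cons, h1]
        have h2 := ih
        simp only [List.tail_cons] at h2
        rw [h2]
        simp [bSpec, hab]
      · have h1 : (aStep ((0:Int), true) (a, b)).1 = 1 := by
          simp only [aStep]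
          norm_num [hab]
          split_ifs <;> rfl
        rcases hst : aStep ((0:Int), true) (a, b) with ⟨n, g⟩
        rw [hst] at h1
        simp only at h1
        subst h1
        rw [List.foldl_cons, hst, foldl_dead _ 1 g (by norm_num)]
        simp [bSpec, hab]


lemma valid_cons (a b c : Int) (t : List Int) :
    sherlockValid (a :: b :: c :: t) = ((a == b) && sherlockValid (b :: c :: t)) := by
  simp only [sherlockValid, PySem.List.len_eq, List.length_cons]
  push_cast
  rw [if_neg (by omega), if_neg (by omega)]
  have e1 : PySem.List.slice (a :: b :: c :: t) none (some ((t.length : Int) + 1 + 1 + 1 - 1))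
      = a :: (b :: c :: t).take (t.length + 1) := by
    rw [PySem.List.slice_to _ (by omega),
        show ((t.length : Int) + 1 + 1 + 1 - 1).toNat = t.length + 2 from by omega]
    rfl
  have e2 : PySem.List.slice (b :: c :: t) none (some ((t.length : Int) + 1 + 1 - 1))
      = (b :: c :: t).take (t.length + 1) := by
    rw [PySem.List.slice_to _ (by omega),
        show ((t.length : Int) + 1 + 1 - 1).toNat = t.length + 1 from by omega]
  have g1 : PySem.List.pyGetD (a :: b :: c :: t) ((t.length : Int) + 1 + 1 + 1 - 1) 0
      = PySem.List.pyGetD (b :: c :: t) ((t.length : Int) + 1 + 1 - 1) 0 := by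
    rw [PySem.List.pyGetD_eq_getElem _ _ (by omega) (by push_cast [List.length_cons]; omega),
        PySem.List.pyGetD_eq_getElem _ _ (by omega) (by push_cast [List.length_cons]; omega),
        getElem_congr rfl (show ((t.length : Int) + 1 + 1 + 1 - 1).toNat = ((t.length : Int) + 1 + 1 - 1).toNat + 1 from by omega) (by simp [List.length_cons])]
    exact List.getElem_cons_succ ..
  have g2 : PySem.List.pyGetD (a :: b :: c :: t) ((t.length : Int) + 1 + 1 + 1 - 2) 0
      = PySem.List.pyGetD (b :: c :: t) ((t.length : Int) + 1 + 1 - 2) 0 := by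
    rw [PySem.List.pyGetD_eq_getElem _ _ (by omega) (by push_cast [List.length_cons]; omega),
        PySem.List.pyGetD_eq_getElem _ _ (by omega) (by push_cast [List.length_cons]; omega),
        getElem_congr rfl (show ((t.length : Int) + 1 + 1 + 1 - 2).toNat = ((t.length : Int) + 1 + 1 - 2).toNat + 1 from by omega) (by simp [List.length_cons])]
    exact List.getElem_cons_succ ..
  rw [e1, e2, g1, g2, PySem.List.pyGetD_zero_cons, PySem.List.pyGetD_zero_cons]
  by_cases hab : a = b
  · subst hab
    simp
  · simp only [List.take_succ_cons, List.all_cons]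
    have hba : (b == a) = false := beq_eq_false_iff_ne.mpr (fun h => hab h.symm)
    have hab' : (a == b) = false := beq_eq_false_iff_ne.mpr hab
    simp [hba, hab']

lemma valid_two (a b : Int) : sherlockValid [a, b] = decide (|b - a| ≤ 1) := by
  simp only [sherlockValid, PySem.List.len_eq, List.length_cons, List.length_nil]
  norm_num
  rw [PySem.List.slice_to _ (by norm_num)]
  simp [PySem.List.pyGetD, PySem.List.pyGet?, PySem.List.pyIdx?]

lemma valid_eq_bSpec (vals : List Int) : sherlockValid vals = bSpec vals := by
  induction vals using bSpec.induct with
  | case1 => rfl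
  | case2 a => rfl
  | case3 a b => rw [valid_two]; rfl
  | case4 a b c t ih => rw [valid_cons, ih]; rfl

lemma dictStep_eq :
    (fun (d : PySem.Dict Char Int) elem =>
        if d.contains elem then d.insert elem (d.getD elem 0 + 1) else d.insert elem 1)
      = fun (d : PySem.Dict Char Int) c => d.insert c (d.getD c 0 + 1) := by
  funext d c
  by_cases h : d.contains c
  · simp [h]
  · simp only [h, Bool.false_eq_true, if_false]
    have : d.getD c 0 = 0 := by
      simp [PySem.Dict.getD, (PySem.Dict.get?_eq_none_iff_contains d c).2 (by simp [h])]
    rw [this]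
    norm_num

-- ===== VERDICT (by name: the statement is the Claim_ definition above) =====
theorem SherlockValidString_spec : Claim_equal_SherlockValidString := by
  intro s _
  show _ = _
  unfold SherlockValidString SherlockValidString_alt
  rw [dictStep_eq]
  simp only [PySem.List.foldl_append_singleton_eq_self, List.nil_append]
  rw [A_fold_eq, aLoop_eq_bSpec, valid_eq_bSpec]
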